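-- pv_equiv track=rewrite | github.com/pyomeca/bioptim_gui | api/bioptim_gui_api/acrobatics_ocp/acrobatics_utils.py | acrobatics_phase_names
-- ===== SOURCE A (Python) =====
-- def acrobatics_phase_names(
--     nb_somersaults: int, position: str, half_twists: list[int]
-- ) -> list[str]:
--     if position == "straight":
--         return [f"Somersault {i + 1}" for i in range(nb_somersaults)] + ["Landing"]
--
--     names = []
--
--     # twist start
--     if half_twists[0] > 0:
--         names.append("Twist")
--
--     last_have_twist = True
--     next_have_twist = half_twists[1] > 0
--     for i in range(1, nb_somersaults):
--         is_last_somersault = i == nb_somersaults - 1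
--         # piking/tuck
--         if last_have_twist:
--             names.append("Pike" if position == "pike" else "Tuck")
--
--         # somersaulting in pike
--         if i == nb_somersaults - 1 or next_have_twist:
--             names.append("Somersault")
--
--         # kick out
--         if next_have_twist or is_last_somersault:
--             names.append("Kick out")
--
--         # twisting
--         if next_have_twist:
--             names.append("Twist")
--
--         last_have_twist = next_have_twist
--         next_have_twist = is_last_somersault or half_twists[i + 1] > 0
--
--     # landing
--     names.append("Landing")
--     return names
-- ===== SOURCE B (Python) =====
-- def acrobatics_phase_names(
--     nb_somersaults: int, position: str, half_twists: list[int]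
-- ) -> list[str]:
--     if position == "straight":
--         return [f"Somersault {i + 1}" for i in range(nb_somersaults)] + ["Landing"]
--
--     shape = "Pike" if position == "pike" else "Tuck"
--     start = ["Twist"] if half_twists[0] > 0 else []
--
--     if nb_somersaults < 2:
--         return start + ["Landing"]
--
--     # stage 1: find the interior somersaults that end in a twist
--     twists = [i for i in range(1, nb_somersaults - 1) if half_twists[i] > 0]
--
--     # stage 2: each interior twist produces one fixed segment, then the final somersault
--     names = start + [shape]
--     for _ in twists:
--         names += ["Somersault", "Kick out", "Twist", shape]
--     names += ["Somersault", "Kick out"]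
--     if half_twists[nb_somersaults - 1] > 0:
--         names.append("Twist")
--     names.append("Landing")
--     return names
-- ===== Notes on version B (the rewrite author's own statement) =====
-- stated objective: alternative
-- what changed: Replaces A's stateful token-by-token scan (threading last_have_twist/next_have_twist and emitting under four per-iteration conditions) with a two-stage construction: first extract the list of interior somersaults ending in a twist, then build the result from fixed segments -- optional start Twist, shape, one ['Somersault','Kick out','Twist',shape] segment per interior twist, the final ['Somersault','Kick out'] (plus Twist), Landing.
import Mathlib
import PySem

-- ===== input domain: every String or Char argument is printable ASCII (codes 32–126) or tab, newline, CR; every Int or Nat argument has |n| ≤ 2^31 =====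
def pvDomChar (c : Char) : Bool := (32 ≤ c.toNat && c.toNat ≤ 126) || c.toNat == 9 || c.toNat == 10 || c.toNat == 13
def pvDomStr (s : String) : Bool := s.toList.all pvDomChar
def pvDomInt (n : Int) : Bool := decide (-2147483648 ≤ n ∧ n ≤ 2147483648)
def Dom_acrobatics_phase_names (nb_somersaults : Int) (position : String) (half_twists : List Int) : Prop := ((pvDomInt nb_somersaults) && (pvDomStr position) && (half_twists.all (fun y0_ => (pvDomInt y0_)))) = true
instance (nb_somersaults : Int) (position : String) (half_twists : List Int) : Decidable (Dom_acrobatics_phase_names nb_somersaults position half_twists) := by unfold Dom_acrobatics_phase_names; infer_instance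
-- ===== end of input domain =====

-- B replaces A's stateful token-by-token scan by a two-stage construction: it first extracts the
-- interior twist indices, then emits one fixed segment per twist; same cost, a different decomposition.

-- ===== PORT A =====
-- A's loop body: state is (names, last_have_twist, next_have_twist); exact branch order of the Python.
def pvStepA (nb_somersaults : Int) (position : String) (half_twists : List Int)
    (st : List String × Bool × Bool) (i : Int) : List String × Bool × Bool :=
  let names := st.1
  let last_have_twist := st.2.1
  let next_have_twist := st.2.2
  let is_last_somersault := i == nb_somersaults - 1
  let names := if last_have_twist then names ++ [if position == "pike" then "Pike" else "Tuck"] else names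
  let names := if i == nb_somersaults - 1 || next_have_twist then names ++ ["Somersault"] else names
  let names := if next_have_twist || is_last_somersault then names ++ ["Kick out"] else names
  let names := if next_have_twist then names ++ ["Twist"] else names
  (names, next_have_twist,
    is_last_somersault || decide (0 < (PySem.List.pyGet? half_twists (i + 1)).getD 0))

def acrobatics_phase_names (nb_somersaults : Int) (position : String) (half_twists : List Int) : List String :=
  if position == "straight" then
    ((PySem.List.pyRange 0 nb_somersaults 1).map (fun i => "Somersault " ++ PySem.Int.toStr (i + 1))) ++ ["Landing"]
  else
    let names : List String :=
      if 0 < (PySem.List.pyGet? half_twists 0).getD 0 then ["Twist"] else []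
    let st := (PySem.List.pyRange 1 nb_somersaults 1).foldl
      (pvStepA nb_somersaults position half_twists)
      (names, true, decide (0 < (PySem.List.pyGet? half_twists 1).getD 0))
    st.1 ++ ["Landing"]

-- ===== PORT B =====
def acrobatics_phase_names_alt (nb_somersaults : Int) (position : String) (half_twists : List Int) : List String :=
  if position == "straight" then
    ((PySem.List.pyRange 0 nb_somersaults 1).map (fun i => "Somersault " ++ PySem.Int.toStr (i + 1))) ++ ["Landing"]
  else
    let shape := if position == "pike" then "Pike" else "Tuck"
    let start : List String :=
      if 0 < (PySem.List.pyGet? half_twists 0).getD 0 then ["Twist"] else []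
    if nb_somersaults < 2 then start ++ ["Landing"]
    else
      -- stage 1: interior somersaults ending in a twist
      let twists := (PySem.List.pyRange 1 (nb_somersaults - 1) 1).filter
        (fun i => decide (0 < (PySem.List.pyGet? half_twists i).getD 0))
      -- stage 2: one fixed segment per interior twist, then the final somersault
      let names := start ++ [shape]
        ++ twists.flatMap (fun _ => ["Somersault", "Kick out", "Twist", shape])
        ++ ["Somersault", "Kick out"]
      let names := if 0 < (PySem.List.pyGet? half_twists (nb_somersaults - 1)).getD 0
        then names ++ ["Twist"] else names
      names ++ ["Landing"]

-- ===== PRECONDITION & SPEC =====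
-- For a non-straight position A reads half_twists[0], half_twists[1] (unconditionally) and up to
-- half_twists[nb_somersaults-1]; Pre_ excludes exactly the inputs where some read raises IndexError.
def Pre_acrobatics_phase_names (nb_somersaults : Int) (position : String) (half_twists : List Int) : Prop :=
  position = "straight" ∨ (2 ≤ half_twists.length ∧ nb_somersaults ≤ (half_twists.length : Int))
instance (nb_somersaults : Int) (position : String) (half_twists : List Int) : Decidable (Pre_acrobatics_phase_names nb_somersaults position half_twists) := by unfold Pre_acrobatics_phase_names; infer_instance
def pvWitness_acrobatics_phase_names : Int × String × List Int := (3, "pike", [1, 0, 1])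


def Spec_acrobatics_phase_names (nb_somersaults : Int) (position : String) (half_twists : List Int) (out : List String) : Prop := out = acrobatics_phase_names_alt nb_somersaults position half_twists
instance (nb_somersaults : Int) (position : String) (half_twists : List Int) (out : List String) : Decidable (Spec_acrobatics_phase_names nb_somersaults position half_twists out) := by unfold Spec_acrobatics_phase_names; infer_instance

-- ===== CLAIM (what is proved, stated in full; the proofs are below) =====
def Claim_equal_acrobatics_phase_names : Prop := ∀ (nb_somersaults : Int) (position : String) (half_twists : List Int), Dom_acrobatics_phase_names nb_somersaults position half_twists → Pre_acrobatics_phase_names nb_somersaults position half_twists → Spec_acrobatics_phase_names nb_somersaults position half_twists (acrobatics_phase_names nb_somersaults position half_twists)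

-- ===== LEMMAS AND PROOFS =====

-- Proof-only bridge: the tokens A's iteration i appends, written as a function of i alone.
def pvBlock (nb : Int) (shape : String) (half_twists : List Int) (i : Int) : List String :=
  let last_twist := i == 1 || decide (0 < (PySem.List.pyGet? half_twists (i - 1)).getD 0)
  let this_twist := decide (0 < (PySem.List.pyGet? half_twists i).getD 0)
  let is_last := i == nb - 1
  (if last_twist then [shape] else [])
    ++ (if is_last || this_twist then ["Somersault"] else [])
    ++ (if this_twist || is_last then ["Kick out"] else [])
    ++ (if this_twist then ["Twist"] else [])

-- One iteration of A's fold, entering with the invariant state, appends exactly pvBlock i.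
theorem pvStepEq (nb : Int) (position : String) (half_twists : List Int)
    (k : Int) (hk : 1 ≤ k) (names : List String) :
    pvStepA nb position half_twists
        (names, (k == 1 || decide (0 < (PySem.List.pyGet? half_twists (k - 1)).getD 0)),
          decide (0 < (PySem.List.pyGet? half_twists k).getD 0)) k
      = (names ++ pvBlock nb (if position == "pike" then "Pike" else "Tuck") half_twists k,
         ((k + 1) == 1 || decide (0 < (PySem.List.pyGet? half_twists ((k + 1) - 1)).getD 0)),
         ((k == nb - 1) || decide (0 < (PySem.List.pyGet? half_twists (k + 1)).getD 0))) := by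
  have h1 : ((k + 1 : Int) == 1) = false := by
    simp only [beq_eq_false_iff_ne, ne_eq]; omega
  have h2 : ((k + 1 : Int) - 1) = k := by omega
  rw [h1, h2]
  simp only [pvStepA, pvBlock, Bool.false_or, Prod.mk.injEq, and_true]
  split_ifs <;> simp_all

-- Loop invariant: entering iteration k (1 ≤ k) with A's state, the fold from k onward appends
-- exactly the blocks for k, k+1, ….
theorem pvLoopEq (nb : Int) (position : String) (half_twists : List Int) :
    ∀ (fuel : Nat) (k : Int), 1 ≤ k → (nb - k).toNat ≤ fuel →
    ∀ (names : List String) (next : Bool),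
    (k < nb → next = decide (0 < (PySem.List.pyGet? half_twists k).getD 0)) →
    ((PySem.List.pyRange k nb 1).foldl (pvStepA nb position half_twists)
        (names, (k == 1 || decide (0 < (PySem.List.pyGet? half_twists (k - 1)).getD 0)), next)).1
      = names ++ (PySem.List.pyRange k nb 1).flatMap
          (pvBlock nb (if position == "pike" then "Pike" else "Tuck") half_twists) := by
  intro fuel
  induction fuel with
  | zero =>
    intro k hk hf names next hnext
    rw [PySem.List.pyRange_one_eq_nil (by omega : nb ≤ k)]
    simp
  | succ n ih =>
    intro k hk hf names next hnext
    by_cases hlt : k < nb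
    · rw [PySem.List.pyRange_one_cons hlt]
      simp only [List.foldl_cons, List.flatMap_cons]
      rw [hnext hlt, pvStepEq nb position half_twists k hk names]
      by_cases hl : k + 1 < nb
      · have hne : (k == nb - 1) = false := by
          simp only [beq_eq_false_iff_ne, ne_eq]; omega
        rw [hne, Bool.false_or]
        rw [ih (k + 1) (by omega) (by omega) _ _ (fun _ => rfl)]
        simp
      · rw [ih (k + 1) (by omega) (by omega) _ _ (fun h => absurd h (by omega))]
        simp
    · rw [PySem.List.pyRange_one_eq_nil (by omega : nb ≤ k)]
      simp

-- The block run rewrites into B's segment form: entering shape (true at k = 1), one fixed segment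
-- per interior twist, then the final somersault.
theorem pvSegEq (nb : Int) (shape : String) (half_twists : List Int) :
    ∀ (fuel : Nat) (k : Int), 1 ≤ k → k ≤ nb - 1 → (nb - 1 - k).toNat ≤ fuel →
    (PySem.List.pyRange k nb 1).flatMap (pvBlock nb shape half_twists)
      = (if (k == 1 || decide (0 < (PySem.List.pyGet? half_twists (k - 1)).getD 0)) then [shape] else [])
        ++ ((PySem.List.pyRange k (nb - 1) 1).filter
              (fun i => decide (0 < (PySem.List.pyGet? half_twists i).getD 0))).flatMap
            (fun _ => ["Somersault", "Kick out", "Twist", shape])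
        ++ ["Somersault", "Kick out"]
        ++ (if 0 < (PySem.List.pyGet? half_twists (nb - 1)).getD 0 then ["Twist"] else []) := by
  intro fuel
  induction fuel with
  | zero =>
    intro k hk hkn hf
    have hkeq : k = nb - 1 := by omega
    subst hkeq
    rw [PySem.List.pyRange_one_eq_nil (le_refl (nb - 1)),
        PySem.List.pyRange_one_cons (by omega : nb - 1 < nb),
        PySem.List.pyRange_one_eq_nil (by omega : nb ≤ nb - 1 + 1)]
    simp only [List.filter_nil, List.flatMap_nil, List.flatMap_cons, List.flatMap_nil,
      List.append_nil, pvBlock, beq_self_eq_true, Bool.or_true, Bool.true_or]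
    split_ifs <;> simp_all
  | succ n ih =>
    intro k hk hkn hf
    by_cases hlt : k < nb - 1
    · rw [PySem.List.pyRange_one_cons (by omega : k < nb),
          PySem.List.pyRange_one_cons hlt]
      simp only [List.flatMap_cons, List.filter_cons]
      rw [ih (k + 1) (by omega) (by omega) (by omega)]
      have hne1 : ((k + 1 : Int) == 1) = false := by
        simp only [beq_eq_false_iff_ne, ne_eq]; omega
      have h2 : ((k + 1 : Int) - 1) = k := by omega
      rw [hne1, h2, Bool.false_or]
      have hnel : (k == nb - 1) = false := by
        simp only [beq_eq_false_iff_ne, ne_eq]; omega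
      simp only [pvBlock, hnel, Bool.false_or, Bool.or_false]
      by_cases ht : (0 : Int) < (PySem.List.pyGet? half_twists k).getD 0
      · simp [ht]
      · simp [ht]
    · have hkeq : k = nb - 1 := by omega
      subst hkeq
      rw [PySem.List.pyRange_one_eq_nil (le_refl (nb - 1)),
          PySem.List.pyRange_one_cons (by omega : nb - 1 < nb),
          PySem.List.pyRange_one_eq_nil (by omega : nb ≤ nb - 1 + 1)]
      simp only [List.filter_nil, List.flatMap_nil, List.flatMap_cons, List.flatMap_nil,
        List.append_nil, pvBlock, beq_self_eq_true, Bool.or_true, Bool.true_or]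
      split_ifs <;> simp_all

-- ===== VERDICT (by name: the statement is the Claim_ definition above) =====
theorem acrobatics_phase_names_spec : Claim_equal_acrobatics_phase_names := by
  intro nb position half_twists _ _
  unfold Spec_acrobatics_phase_names acrobatics_phase_names acrobatics_phase_names_alt
  by_cases hs : position == "straight"
  · rw [if_pos hs, if_pos hs]
  · rw [if_neg hs, if_neg hs]
    dsimp only
    have h := pvLoopEq nb position half_twists (nb - 1).toNat 1 le_rfl le_rfl
      (if 0 < (PySem.List.pyGet? half_twists 0).getD 0 then ["Twist"] else [])
      (decide (0 < (PySem.List.pyGet? half_twists 1).getD 0)) (fun _ => rfl)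
    simp only [show (1 : Int) - 1 = 0 from rfl] at h
    simp only [beq_self_eq_true, Bool.true_or] at h
    rw [h]
    by_cases hnb : nb < 2
    · rw [if_pos hnb, PySem.List.pyRange_one_eq_nil (by omega : nb ≤ 1)]
      simp
    · rw [if_neg hnb]
      rw [pvSegEq nb (if position == "pike" then "Pike" else "Tuck") half_twists
            (nb - 2).toNat 1 le_rfl (by omega) (by omega)]
      simp only [show (1 : Int) - 1 = 0 from rfl, beq_self_eq_true, Bool.true_or, if_pos]
      split_ifs <;> simp
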